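-- pv_equiv track=rewrite | github.com/viratbahiya143-ui/tsx-logic | tsx logic/trafft refrences/taaft_automation.py | assign_proxies_to_accounts
-- ===== SOURCE A (Python) =====
-- def assign_proxies_to_accounts(accounts, proxy_pool):
--     """Assign unique proxy to each account. Auto failover: if one fails, try next."""
--     assigned = []
--     used = set()
--     for acct in accounts:
--         if acct.get("proxy"):
--             # Already has manually assigned proxy
--             assigned.append(acct)
--             continue
--         # Find an unused proxy from pool
--         proxy_assigned = None
--         for proxy in proxy_pool:
--             if proxy not in used:
--                 proxy_assigned = proxy
--                 used.add(proxy)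
--                 break
--         acct["proxy"] = proxy_assigned
--         assigned.append(acct)
--     return assigned
-- ===== SOURCE B (Python) =====
-- def assign_proxies_to_accounts(accounts, proxy_pool):
--     """Assign unique proxy to each account. Auto failover: if one fails, try next."""
--     fresh = iter(dict.fromkeys(proxy_pool))
--     for acct in accounts:
--         if not acct.get("proxy"):
--             acct["proxy"] = next(fresh, None)
--     return list(accounts)
-- ===== Notes on version B (the rewrite author's own statement) =====
-- stated objective: alternative
-- what changed: A rescans proxy_pool from the start for every account while maintaining a 'used' set; B deduplicates the pool once (dict.fromkeys) and consumes it with a single advancing iterator, one proxy per needy account.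
-- outside the precondition, e.g. on assign_proxies_to_accounts([{}], []): A returns [{'proxy': None}], B returns [{'proxy': None}]
import Mathlib
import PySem

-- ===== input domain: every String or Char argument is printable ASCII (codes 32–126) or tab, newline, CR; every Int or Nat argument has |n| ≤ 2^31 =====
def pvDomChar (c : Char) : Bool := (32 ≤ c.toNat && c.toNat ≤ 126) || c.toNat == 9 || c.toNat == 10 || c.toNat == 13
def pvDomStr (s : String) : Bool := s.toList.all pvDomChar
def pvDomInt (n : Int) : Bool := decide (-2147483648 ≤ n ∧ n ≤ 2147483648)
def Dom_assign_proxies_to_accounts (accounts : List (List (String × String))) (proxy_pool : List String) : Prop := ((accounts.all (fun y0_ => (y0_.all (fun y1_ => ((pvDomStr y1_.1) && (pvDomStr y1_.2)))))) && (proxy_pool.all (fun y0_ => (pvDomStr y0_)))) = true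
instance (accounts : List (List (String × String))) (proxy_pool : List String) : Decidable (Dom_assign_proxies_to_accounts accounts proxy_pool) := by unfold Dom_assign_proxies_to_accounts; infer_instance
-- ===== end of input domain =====

-- B replaces A's per-account rescan of proxy_pool (with a 'used' set) by one deduplicated
-- pool consumed left to right by an iterator; return values agree (objective: alternative).
-- Both Pythons mutate the account dicts in place; the equivalence proved here is about the
-- RETURN value (B performs the same mutation).

-- ===== PORT A =====
-- inner 'for proxy in proxy_pool: if proxy not in used: … break' — first pool element not in used
def pvFindUnused (pool : List String) (used : PySem.Set String) : Option String :=
  match pool with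
  | [] => none
  | p :: ps => if PySem.Set.contains used p then pvFindUnused ps used else some p

def assign_proxies_to_accounts (accounts : List (List (String × String))) (proxy_pool : List String) : List (List (String × String)) :=
  -- state: (assigned, used); each Python dict is modelled as PySem.Dict.ofList of its pair list
  (accounts.foldl
    (fun (st : List (List (String × String)) × PySem.Set String) acct =>
      let d := PySem.Dict.ofList acct
      if d.getD "proxy" "" ≠ "" then (st.1 ++ [d.items], st.2)
      else
        match pvFindUnused proxy_pool st.2 with
        | some p => (st.1 ++ [(d.insert "proxy" p).items], PySem.Set.add st.2 p)
        | none => (st.1 ++ [(d.insert "proxy" "").items], st.2))  -- Python writes None here; excluded by Pre_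
    ([], PySem.Set.empty)).1

-- ===== PORT B =====
-- 'for acct in accounts: … acct["proxy"] = next(fresh, None)' — recursion consuming the fresh list
def pvAssignLoop (accounts : List (List (String × String))) (fresh : List String) : List (List (String × String)) :=
  match accounts with
  | [] => []
  | acct :: rest =>
    let d := PySem.Dict.ofList acct
    if d.getD "proxy" "" ≠ "" then d.items :: pvAssignLoop rest fresh
    else
      match fresh with
      | p :: fs => (d.insert "proxy" p).items :: pvAssignLoop rest fs
      | [] => (d.insert "proxy" "").items :: pvAssignLoop rest []  -- Python writes None here; excluded by Pre_

def assign_proxies_to_accounts_alt (accounts : List (List (String × String))) (proxy_pool : List String) : List (List (String × String)) :=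
  pvAssignLoop accounts (PySem.List.dedup proxy_pool)

-- ===== PRECONDITION & SPEC =====
-- Pre_ excludes pools with fewer distinct proxies than accounts needing one: there both Pythons
-- assign the non-string None (unrepresentable as the declared String value type).
def Pre_assign_proxies_to_accounts (accounts : List (List (String × String))) (proxy_pool : List String) : Prop :=
  (accounts.countP (fun acct => (PySem.Dict.ofList acct).getD "proxy" "" = "")) ≤ (PySem.List.dedup proxy_pool).length
instance (accounts : List (List (String × String))) (proxy_pool : List String) : Decidable (Pre_assign_proxies_to_accounts accounts proxy_pool) := by unfold Pre_assign_proxies_to_accounts; infer_instance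

def pvWitness_assign_proxies_to_accounts : (List (List (String × String))) × List String :=
  ([[("user", "a")], [("proxy", "p1"), ("user", "b")], [("proxy", "")]], ["p2", "p2", "p3"])

def Spec_assign_proxies_to_accounts (accounts : List (List (String × String))) (proxy_pool : List String) (out : List (List (String × String))) : Prop := out = assign_proxies_to_accounts_alt accounts proxy_pool
instance (accounts : List (List (String × String))) (proxy_pool : List String) (out : List (List (String × String))) : Decidable (Spec_assign_proxies_to_accounts accounts proxy_pool out) := by unfold Spec_assign_proxies_to_accounts; infer_instance

-- ===== CLAIM (what is proved, stated in full; the proofs are below) =====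
def Claim_equal_assign_proxies_to_accounts : Prop := ∀ (accounts : List (List (String × String))) (proxy_pool : List String), Dom_assign_proxies_to_accounts accounts proxy_pool → Pre_assign_proxies_to_accounts accounts proxy_pool → Spec_assign_proxies_to_accounts accounts proxy_pool (assign_proxies_to_accounts accounts proxy_pool)

-- ===== LEMMAS AND PROOFS =====

-- A's inner scan returns the head of the unfiltered pool elements
lemma pvFindUnused_eq_head_filter (pool : List String) (used : PySem.Set String) :
    pvFindUnused pool used = (pool.filter (fun x => !PySem.Set.contains used x)).head? := by
  induction pool with
  | nil => rfl
  | cons p ps ih =>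
    by_cases h : p ∈ used
    · simp [pvFindUnused, h, ih]
    · simp [pvFindUnused, h]

-- dedup commutes with filter
lemma dedup_filter (q : String → Bool) (l : List String) :
    (PySem.List.dedup l).filter q = PySem.List.dedup (l.filter q) := by
  induction l with
  | nil => rfl
  | cons x xs ih =>
    simp only [PySem.List.dedup] at ih ⊢
    by_cases hq : q x
    · simp only [PySem.Set.ofList_cons, List.filter_cons, hq, ite_true, PySem.Set.discard]
      rw [← ih, List.filter_filter, List.filter_filter]
      congr 1
      apply List.filter_congr; intro y _; rw [Bool.and_comm]
    · simp only [PySem.Set.ofList_cons, List.filter_cons, hq, Bool.false_eq_true, ite_false,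
        PySem.Set.discard]
      rw [← ih, List.filter_filter]
      apply List.filter_congr; intro y _
      by_cases hyx : y = x
      · subst hyx; simp [hq]
      · simp [hyx]

lemma head?_dedup (l : List String) : (PySem.List.dedup l).head? = l.head? := by
  cases l with
  | nil => rfl
  | cons x xs => simp [PySem.List.dedup, PySem.Set.ofList_cons]

-- the scan's value when used is the consumed prefix of the deduplicated pool
lemma pvFindUnused_of_split (pool pre fresh : List String)
    (h : PySem.List.dedup pool = pre ++ fresh) :
    pvFindUnused pool pre = fresh.head? := by
  have hnd : (pre ++ fresh).Nodup := by
    rw [← h]; exact PySem.Set.nodup_ofList pool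
  rw [pvFindUnused_eq_head_filter]
  calc (pool.filter (fun x => !PySem.Set.contains pre x)).head?
      = (PySem.List.dedup (pool.filter (fun x => !PySem.Set.contains pre x))).head? := by
        rw [head?_dedup]
    _ = ((PySem.List.dedup pool).filter (fun x => !PySem.Set.contains pre x)).head? := by
        rw [dedup_filter]
    _ = fresh.head? := by
        rw [h, List.filter_append]
        have h1 : pre.filter (fun x => !PySem.Set.contains pre x) = [] := by
          rw [List.filter_eq_nil_iff]
          intro a ha
          simp [ha]
        have h2 : fresh.filter (fun x => !PySem.Set.contains pre x) = fresh := by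
          rw [List.filter_eq_self]
          intro a ha
          have : a ∉ pre := by
            intro hap
            exact (List.nodup_append.mp hnd).2.2 a hap a ha rfl
          simp [this]
        rw [h1, h2, List.nil_append]

lemma nodup_disjoint_head (pre : List String) (p : String) (fs : List String)
    (h : (pre ++ p :: fs).Nodup) : p ∉ pre := by
  intro hp
  exact (List.nodup_append.mp h).2.2 p hp p (List.mem_cons_self) rfl

-- main loop correspondence
lemma loop_eq (pool : List String) :
    ∀ (accounts : List (List (String × String))) (acc : List (List (String × String)))
      (pre fresh : List String),
      PySem.List.dedup pool = pre ++ fresh →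
      (accounts.countP (fun acct => (PySem.Dict.ofList acct).getD "proxy" "" = "")) ≤ fresh.length →
      (accounts.foldl
        (fun (st : List (List (String × String)) × PySem.Set String) acct =>
          let d := PySem.Dict.ofList acct
          if d.getD "proxy" "" ≠ "" then (st.1 ++ [d.items], st.2)
          else
            match pvFindUnused pool st.2 with
            | some p => (st.1 ++ [(d.insert "proxy" p).items], PySem.Set.add st.2 p)
            | none => (st.1 ++ [(d.insert "proxy" "").items], st.2))
        (acc, pre)).1 = acc ++ pvAssignLoop accounts fresh := by
  intro accounts
  induction accounts with
  | nil => intro acc pre fresh _ _; simp [pvAssignLoop]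
  | cons acct rest ih =>
    intro acc pre fresh hsplit hcount
    rw [List.countP_cons] at hcount
    simp only [List.foldl_cons, pvAssignLoop]
    by_cases hd : (PySem.Dict.ofList acct).getD "proxy" "" ≠ ""
    · rw [if_pos hd, if_pos hd]
      have hc : rest.countP (fun acct => (PySem.Dict.ofList acct).getD "proxy" "" = "") ≤ fresh.length := by
        simp only [decide_eq_true_eq] at hcount
        rw [if_neg (by simpa using hd)] at hcount
        omega
      rw [ih (acc ++ [(PySem.Dict.ofList acct).items]) pre fresh hsplit hc]
      simp
    · have hd' : (PySem.Dict.ofList acct).getD "proxy" "" = "" := by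
        simpa using hd
      rw [if_neg hd, if_neg hd]
      have hcount' : 1 + (rest.countP (fun acct => (PySem.Dict.ofList acct).getD "proxy" "" = "")) ≤ fresh.length := by
        simp only [decide_eq_true_eq] at hcount
        rw [if_pos hd'] at hcount
        omega
      cases fresh with
      | nil => simp at hcount'
      | cons p fs =>
        have hfind : pvFindUnused pool pre = some p := by
          rw [pvFindUnused_of_split pool pre (p :: fs) hsplit]; rfl
        rw [hfind]
        have hnd : (pre ++ p :: fs).Nodup := by
          rw [← hsplit]; exact PySem.Set.nodup_ofList pool
        have hpnot : p ∉ pre := nodup_disjoint_head pre p fs hnd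
        have hadd : PySem.Set.add pre p = pre ++ [p] := PySem.Set.add_of_not_mem hpnot
        simp only [hadd]
        have hlen : (p :: fs).length = fs.length + 1 := rfl
        rw [ih (acc ++ [((PySem.Dict.ofList acct).insert "proxy" p).items]) (pre ++ [p]) fs
          (by rw [hsplit]; simp) (by omega)]
        simp

-- ===== VERDICT (by name: the statement is the Claim_ definition above) =====
theorem assign_proxies_to_accounts_spec : Claim_equal_assign_proxies_to_accounts := by
  intro accounts proxy_pool _ hpre
  unfold Spec_assign_proxies_to_accounts assign_proxies_to_accounts assign_proxies_to_accounts_alt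
  have := loop_eq proxy_pool accounts [] [] (PySem.List.dedup proxy_pool) (by simp)
    (by simpa [PySem.List.dedup] using hpre)
  simpa using this
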